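-- pv_equiv track=rewrite | github.com/Sefalilohani/Techtic-updates | scripts/send_techtic_update.py | format_task_type_table
-- ===== SOURCE A (Python) =====
-- SEV_ORDER = ["0-1", "2 - 3", "4 - 5", "6 - 7", "8 - 14", "15 - 30", "31 - 90", "90+"]
--
-- SEV_SHORT = {
--     "0-1": "0-1", "2 - 3": "2-3", "4 - 5": "4-5", "6 - 7": "6-7",
--     "8 - 14": "8-14", "15 - 30": "15-30", "31 - 90": "31-90", "90+": "90+",
-- }
--
-- def format_task_type_table(pivot):
--     task_types = sorted(set(t for sev_data in pivot.values() for t in sev_data))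
--     sevs       = [s for s in SEV_ORDER if s in pivot]
--
--     lw = max(20, max(len(t) for t in task_types) + 2)
--     sw = 7
--     tw = 7
--
--     sev_hdrs = [SEV_SHORT.get(s, s) for s in sevs]
--     header = f"{'Task Type':<{lw}}" + "".join(f"{h:>{sw}}" for h in sev_hdrs) + f"{'Total':>{tw}}"
--     sep    = "-" * len(header)
--
--     lines = ["```", header, sep]
--     grand_total = 0
--
--     for task_type in task_types:
--         row_total = sum(pivot[s].get(task_type, 0) for s in sevs)
--         grand_total += row_total
--         cells = "".join(f"{pivot[s].get(task_type, 0) or '-':>{sw}}" for s in sevs)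
--         lines.append(f"{task_type:<{lw}}{cells}{row_total:>{tw}}")
--
--     lines.append(sep)
--     col_tots = "".join(
--         f"{sum(pivot[s].get(t, 0) for t in task_types):>{sw}}" for s in sevs
--     )
--     lines.append(f"{'Total':<{lw}}{col_tots}{grand_total:>{tw}}")
--     lines.append("```")
--
--     return "\n".join(lines)
-- ===== SOURCE B (Python) =====
-- SEV_ORDER = ["0-1", "2 - 3", "4 - 5", "6 - 7", "8 - 14", "15 - 30", "31 - 90", "90+"]
--
-- SEV_SHORT = {
--     "0-1": "0-1", "2 - 3": "2-3", "4 - 5": "4-5", "6 - 7": "6-7",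
--     "8 - 14": "8-14", "15 - 30": "15-30", "31 - 90": "31-90", "90+": "90+",
-- }
--
--
-- def format_task_type_table(pivot):
--     sevs = [s for s in SEV_ORDER if s in pivot]
--
--     # ONE pass over the kept severity rows computes every total at once:
--     # per-task row totals (a dict), per-severity column totals, grand total.
--     row_tot = {}
--     col_tot = []
--     grand = 0
--     for s in sevs:
--         c = 0
--         for t, v in pivot[s].items():
--             row_tot[t] = row_tot.get(t, 0) + v
--             c += v
--         col_tot.append(c)
--         grand += c
--
--     task_types = sorted(set(t for sev_data in pivot.values() for t in sev_data))
--     lw = max(20, max(len(t) for t in task_types) + 2)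
--
--     # COLUMN-MAJOR rendering: start every line with its left label, then grow all
--     # lines together, one 7-wide severity column at a time, then the Total column.
--     head = "Task Type".ljust(lw)
--     body = [t.ljust(lw) for t in task_types]
--     foot = "Total".ljust(lw)
--     for s, c in zip(sevs, col_tot):
--         col = pivot[s]
--         head += SEV_SHORT.get(s, s).rjust(7)
--         body = [line + ("-" if col.get(t, 0) == 0 else str(col.get(t, 0))).rjust(7)
--                 for line, t in zip(body, task_types)]
--         foot += str(c).rjust(7)
--     head += "Total".rjust(7)
--     body = [line + str(row_tot.get(t, 0)).rjust(7) for line, t in zip(body, task_types)]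
--     foot += str(grand).rjust(7)
--
--     sep = "-" * len(head)
--     return "\n".join(["```", head, sep] + body + [sep, foot, "```"])
-- ===== Notes on version B (the rewrite author's own statement) =====
-- stated objective: alternative
-- what changed: B replaces A's row-major rendering with interleaved pivot rescans by (1) one fused pass over the kept severity rows that accumulates the row-total dict, the per-severity column totals (each just the sum of that row's values) and the grand total before anything is rendered, and (2) a column-major rendering that starts every output line with its left label and then grows head, all body lines and foot together, one 7-wide severity column at a time.
import Mathlib
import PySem

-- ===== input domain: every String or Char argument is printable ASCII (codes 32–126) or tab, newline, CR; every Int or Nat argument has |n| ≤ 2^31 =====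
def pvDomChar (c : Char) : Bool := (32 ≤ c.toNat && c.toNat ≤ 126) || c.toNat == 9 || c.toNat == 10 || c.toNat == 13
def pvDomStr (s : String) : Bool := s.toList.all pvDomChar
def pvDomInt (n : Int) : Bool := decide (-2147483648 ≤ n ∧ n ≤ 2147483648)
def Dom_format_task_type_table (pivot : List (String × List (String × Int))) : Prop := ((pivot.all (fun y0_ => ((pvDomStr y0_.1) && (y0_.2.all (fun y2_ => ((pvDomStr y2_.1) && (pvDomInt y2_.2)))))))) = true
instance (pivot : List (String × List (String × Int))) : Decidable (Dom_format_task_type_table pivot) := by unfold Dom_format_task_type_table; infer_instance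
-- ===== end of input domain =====

-- B computes all three kinds of totals (row, column, grand) in ONE pass over the kept severity
-- rows before any rendering, and renders the table COLUMN-major (growing every line by one
-- 7-wide column per severity), instead of A's row-major rendering with per-row and per-column
-- pivot rescans; same cost, different decomposition.

-- ===== PORT A =====
-- shared module constants and the f-string padding primitives both Pythons use
def pvSevOrder : List String := ["0-1", "2 - 3", "4 - 5", "6 - 7", "8 - 14", "15 - 30", "31 - 90", "90+"]

def pvSevShort : PySem.Dict String String :=
  PySem.Dict.ofList [("0-1", "0-1"), ("2 - 3", "2-3"), ("4 - 5", "4-5"), ("6 - 7", "6-7"),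
                     ("8 - 14", "8-14"), ("15 - 30", "15-30"), ("31 - 90", "31-90"), ("90+", "90+")]

-- f"{s:<{w}}" / f"{s:>{w}}" on ASCII text, as the List Char it denotes
def pvLeftPad (s : List Char) (w : Nat) : List Char := s ++ List.replicate (w - s.length) ' '
def pvRightPad (s : List Char) (w : Nat) : List Char := List.replicate (w - s.length) ' ' ++ s
def pvIntStr (n : Int) : List Char := (PySem.Int.toStr n).toList

-- sorted(set(t for sev_data in pivot.values() for t in sev_data))
def pvTaskTypes (d : PySem.Dict String (List (String × Int))) : List String :=
  PySem.List.sorted (PySem.Set.ofList (d.values.flatMap (fun sev_data => (PySem.Dict.ofList sev_data).keys))) (fun t => t) false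

-- pivot[s].get(t, 0)   (s is always a present key where this is used)
def pvCellVal (d : PySem.Dict String (List (String × Int))) (s t : String) : Int :=
  (PySem.Dict.ofList (d.getD s [])).getD t 0

-- max(20, max(len(t) for t in task_types) + 2)   (the inner max of an empty list raises; outside Pre_)
def pvLw (task_types : List String) : Nat :=
  max 20 ((task_types.foldl (fun acc t => max acc t.toList.length) 0) + 2)

-- f"{v or '-':>7}" rendering of one cell value (both Pythons use this rule)
def pvCellStr (v : Int) : List Char := pvRightPad (if v = 0 then ['-'] else pvIntStr v) 7

def pvHeader (sevs : List String) (lw : Nat) : List Char :=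
  pvLeftPad "Task Type".toList lw
    ++ (sevs.map (fun s => pvRightPad (pvSevShort.getD s s).toList 7)).flatten
    ++ pvRightPad "Total".toList 7

def format_task_type_table (pivot : List (String × List (String × Int))) : String :=
  let d := PySem.Dict.ofList pivot
  let task_types := pvTaskTypes d
  let sevs := pvSevOrder.filter (fun s => d.contains s)
  let lw := pvLw task_types
  let header := pvHeader sevs lw
  let sep := List.replicate header.length '-'
  -- the row loop: appends one rendered line per task type while accumulating grand_total
  let st := task_types.foldl (fun (st : List (List Char) × Int) task_type =>
      let row_total := sevs.foldl (fun acc s => acc + pvCellVal d s task_type) 0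
      let cells := (sevs.map (fun s => pvCellStr (pvCellVal d s task_type))).flatten
      (st.1 ++ [pvLeftPad task_type.toList lw ++ cells ++ pvRightPad (pvIntStr row_total) 7],
       st.2 + row_total))
    ([['`','`','`'], header, sep], 0)
  let lines1 := st.1 ++ [sep]
  let col_tots := (sevs.map (fun s =>
      pvRightPad (pvIntStr (task_types.foldl (fun acc t => acc + pvCellVal d s t) 0)) 7)).flatten
  let lines2 := lines1 ++ [pvLeftPad "Total".toList lw ++ col_tots ++ pvRightPad (pvIntStr st.2) 7]
  let lines3 := lines2 ++ [['`','`','`']]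
  String.ofList (PySem.Chars.join ['\n'] lines3)

-- ===== PORT B =====
def format_task_type_table_alt (pivot : List (String × List (String × Int))) : String :=
  let d := PySem.Dict.ofList pivot
  let sevs := pvSevOrder.filter (fun s => d.contains s)
  -- ONE pass over the kept severity rows computes every total at once:
  -- per-task row totals (a dict), per-severity column totals, grand total
  let tot := sevs.foldl (fun (st : PySem.Dict String Int × List Int × Int) s =>
      let p := (PySem.Dict.ofList (d.getD s [])).items.foldl
          (fun (p : PySem.Dict String Int × Int) tv =>
            (p.1.insert tv.1 (p.1.getD tv.1 0 + tv.2), p.2 + tv.2)) (st.1, 0)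
      (p.1, st.2.1 ++ [p.2], st.2.2 + p.2))
    (PySem.Dict.empty, [], 0)
  let row_tot := tot.1
  let col_tot := tot.2.1
  let grand := tot.2.2
  let task_types := pvTaskTypes d
  let lw := pvLw task_types
  -- COLUMN-major rendering: start every line with its left label, then grow head,
  -- all body lines and foot together, one 7-wide severity column at a time
  let st := (sevs.zip col_tot).foldl (fun (st : List Char × List (List Char) × List Char) sc =>
      (st.1 ++ pvRightPad (pvSevShort.getD sc.1 sc.1).toList 7,
       List.zipWith (fun line t => line ++ pvCellStr (pvCellVal d sc.1 t)) st.2.1 task_types,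
       st.2.2 ++ pvRightPad (pvIntStr sc.2) 7))
    (pvLeftPad "Task Type".toList lw, task_types.map (fun t => pvLeftPad t.toList lw),
     pvLeftPad "Total".toList lw)
  let head := st.1 ++ pvRightPad "Total".toList 7
  let body := List.zipWith (fun line t => line ++ pvRightPad (pvIntStr (row_tot.getD t 0)) 7)
      st.2.1 task_types
  let foot := st.2.2 ++ pvRightPad (pvIntStr grand) 7
  let sep := List.replicate head.length '-'
  String.ofList (PySem.Chars.join ['\n'] ([['`','`','`'], head, sep] ++ body ++ [sep, foot, ['`','`','`']]))

-- ===== PRECONDITION & SPEC =====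
-- Pre_ excludes exactly the pivots whose severity rows carry no task type at all: there
-- Python A raises ValueError (max() of an empty sequence), so A returns no value.
def Pre_format_task_type_table (pivot : List (String × List (String × Int))) : Prop :=
  (PySem.Dict.ofList pivot).values.flatMap (fun sev_data => (PySem.Dict.ofList sev_data).keys) ≠ []
instance (pivot : List (String × List (String × Int))) : Decidable (Pre_format_task_type_table pivot) := by unfold Pre_format_task_type_table; infer_instance

def pvWitness_format_task_type_table : (List (String × List (String × Int))) :=
  [("0-1", [("bug", 3), ("chore", 0)]), ("90+", [("bug", 2)])]

def Spec_format_task_type_table (pivot : List (String × List (String × Int))) (out : String) : Prop := out = format_task_type_table_alt pivot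
instance (pivot : List (String × List (String × Int))) (out : String) : Decidable (Spec_format_task_type_table pivot out) := by unfold Spec_format_task_type_table; infer_instance

-- ===== CLAIM (what is proved, stated in full; the proofs are below) =====
def Claim_equal_format_task_type_table : Prop := ∀ (pivot : List (String × List (String × Int))), Dom_format_task_type_table pivot → Pre_format_task_type_table pivot → Spec_format_task_type_table pivot (format_task_type_table pivot)

-- ===== LEMMAS AND PROOFS =====

-- the row-total-dict update B's inner loop performs, isolated
def pvCounterAdd (rt : PySem.Dict String Int) (row : List (String × Int)) : PySem.Dict String Int :=
  row.foldl (fun rt tv => rt.insert tv.1 (rt.getD tv.1 0 + tv.2)) rt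

-- B's inner pair loop = the dict update plus the running value sum
theorem pvPairFold (row : List (String × Int)) :
    ∀ (rt : PySem.Dict String Int) (c : Int),
      row.foldl (fun (p : PySem.Dict String Int × Int) tv =>
          (p.1.insert tv.1 (p.1.getD tv.1 0 + tv.2), p.2 + tv.2)) (rt, c)
        = (pvCounterAdd rt row, c + (row.map (·.2)).sum) := by
  induction row with
  | nil => intro rt c; simp [pvCounterAdd]
  | cons tv row ih =>
    intro rt c
    simp only [List.foldl_cons, List.map_cons, List.sum_cons, ih, pvCounterAdd]
    simp [add_assoc]

-- what the dict update does to one lookup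
theorem pvCounterAdd_getD (row : List (String × Int)) :
    ∀ (rt : PySem.Dict String Int) (t : String),
      (pvCounterAdd rt row).getD t 0
        = rt.getD t 0 + ((row.filter (fun tv => tv.1 == t)).map (·.2)).sum := by
  induction row with
  | nil => intro rt t; simp [pvCounterAdd]
  | cons tv row ih =>
    intro rt t
    simp only [pvCounterAdd, List.foldl_cons] at *
    rw [ih, PySem.Dict.getD_insert]
    by_cases h : tv.1 = t
    · simp [h]; ring
    · simp [h, Ne.symm h]

-- for a dict with distinct keys, summing the values whose key is t is one lookup
theorem pvDictFilterSum (w : PySem.Dict String Int) (hnd : w.keys.Nodup) (t : String) :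
    ((w.items.filter (fun tv => tv.1 == t)).map (·.2)).sum = w.getD t 0 := by
  rw [PySem.Dict.items_eq_map_keys w hnd 0, List.filter_map, List.map_map]
  by_cases h : t ∈ w.keys
  · have : w.keys.filter ((fun tv : String × Int => tv.1 == t) ∘ fun k => (k, w.getD k 0))
        = [t] := by
      have : (w.keys.filter (· == t)) = [t] := by
        rw [List.filter_beq, List.count_eq_one_of_mem hnd h]; rfl
      simpa [Function.comp] using this
    simp [this]
  · have h0 : w.getD t 0 = 0 := by
      apply PySem.Dict.getD_of_not_contains
      rw [PySem.Dict.contains_eq_decide_mem_keys]; simpa using h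
    have : (w.keys.filter ((fun tv : String × Int => tv.1 == t) ∘ fun k => (k, w.getD k 0)))
        = [] := by
      rw [List.filter_eq_nil_iff]
      intro a ha
      simp only [Function.comp_apply, beq_iff_eq]
      rintro rfl
      exact h ha
    simp [this, h0]

-- B's row-total dict, read at any task type, is A's per-row sum over the kept severities
theorem pvRowTot (d : PySem.Dict String (List (String × Int))) (sevs : List String) :
    ∀ (rt : PySem.Dict String Int) (t : String),
      (sevs.foldl (fun rt s => pvCounterAdd rt (PySem.Dict.ofList (d.getD s [])).items) rt).getD t 0
        = rt.getD t 0 + (sevs.map (fun s => pvCellVal d s t)).sum := by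
  induction sevs with
  | nil => intro rt t; simp
  | cons s sevs ih =>
    intro rt t
    simp only [List.foldl_cons, List.map_cons, List.sum_cons, ih, pvCounterAdd_getD,
      pvDictFilterSum _ (PySem.Dict.nodup_keys_ofList _) t]
    show _ = rt.getD t 0 + (pvCellVal d s t + _)
    rw [pvCellVal]; ring

-- B's one-pass totals loop, characterised: final dict, column totals, grand total
theorem pvTotalsChar (d : PySem.Dict String (List (String × Int))) (sevs : List String) :
    ∀ (rt : PySem.Dict String Int) (acc : List Int) (g : Int),
      sevs.foldl (fun (st : PySem.Dict String Int × List Int × Int) s =>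
          let p := (PySem.Dict.ofList (d.getD s [])).items.foldl
              (fun (p : PySem.Dict String Int × Int) tv =>
                (p.1.insert tv.1 (p.1.getD tv.1 0 + tv.2), p.2 + tv.2)) (st.1, 0)
          (p.1, st.2.1 ++ [p.2], st.2.2 + p.2)) (rt, acc, g)
        = (sevs.foldl (fun rt s => pvCounterAdd rt (PySem.Dict.ofList (d.getD s [])).items) rt,
           acc ++ sevs.map (fun s => (((PySem.Dict.ofList (d.getD s [])).items.map (·.2)).sum)),
           g + (sevs.map (fun s => (((PySem.Dict.ofList (d.getD s [])).items.map (·.2)).sum))).sum) := by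
  induction sevs with
  | nil => intro rt acc g; simp
  | cons s sevs ih =>
    intro rt acc g
    simp only [List.foldl_cons, pvPairFold, zero_add] at ih ⊢
    rw [ih]
    simp [add_assoc]

-- summing 'x at position a, 0 elsewhere' over a duplicate-free list containing a gives x
theorem pvSumIteSingle (ts : List String) (hnd : ts.Nodup) (a : String) (x : Int) :
    (ts.map (fun t => if a = t then x else 0)).sum = if a ∈ ts then x else 0 := by
  induction ts with
  | nil => simp
  | cons b ts ih =>
    simp only [List.nodup_cons] at hnd
    by_cases h : a = b
    · subst h
      simp [ih hnd.2, hnd.1]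
    · simp [h, ih hnd.2]

-- splitting a total over values by which key of ts each pair carries
theorem pvSumFilterSplit (ts : List String) (hnd : ts.Nodup) (ys : List (String × Int))
    (hsub : ∀ p ∈ ys, p.1 ∈ ts) :
    (ts.map (fun t => ((ys.filter (fun p => p.1 == t)).map (·.2)).sum)).sum
      = (ys.map (·.2)).sum := by
  induction ys with
  | nil => simp
  | cons p ys ih =>
    have hmem : p.1 ∈ ts := hsub p (List.mem_cons_self ..)
    have step : ∀ t : String,
        (((p :: ys).filter (fun q => q.1 == t)).map (·.2)).sum
          = (if p.1 = t then p.2 else 0) + ((ys.filter (fun q => q.1 == t)).map (·.2)).sum := by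
      intro t
      by_cases h : p.1 = t <;> simp [h]
    calc (ts.map (fun t => (((p :: ys).filter (fun q => q.1 == t)).map (·.2)).sum)).sum
        = (ts.map (fun t => (if p.1 = t then p.2 else 0)
            + ((ys.filter (fun q => q.1 == t)).map (·.2)).sum)).sum := by
          exact congrArg List.sum (List.map_congr_left (fun t _ => step t))
      _ = (ts.map (fun t => if p.1 = t then p.2 else 0)).sum
            + (ts.map (fun t => ((ys.filter (fun q => q.1 == t)).map (·.2)).sum)).sum := by
          rw [← PySem.List.sum_map_add_int]
      _ = (( p :: ys).map (·.2)).sum := by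
          rw [pvSumIteSingle ts hnd p.1 p.2, if_pos hmem,
            ih (fun q hq => hsub q (List.mem_cons_of_mem _ hq))]
          simp

-- a column total: summing one column's lookup over all task types is the sum of its values
theorem pvColSum (ts : List String) (hnd : ts.Nodup) (w : PySem.Dict String Int)
    (hw : w.keys.Nodup) (hkeys : ∀ k ∈ w.keys, k ∈ ts) :
    (ts.map (fun t => w.getD t 0)).sum = (w.items.map (·.2)).sum := by
  calc (ts.map (fun t => w.getD t 0)).sum
      = (ts.map (fun t => ((w.items.filter (fun tv => tv.1 == t)).map (·.2)).sum)).sum :=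
        congrArg List.sum (List.map_congr_left (fun t _ => (pvDictFilterSum w hw t).symm))
    _ = (w.items.map (·.2)).sum :=
        pvSumFilterSplit ts hnd w.items
          (fun p hp => hkeys p.1 (PySem.Dict.mem_keys_of_mem_items w hp))

-- swapping a double sum
theorem pvSumComm (ss ts : List String) (f : String → String → Int) :
    (ts.map (fun t => (ss.map (fun s => f s t)).sum)).sum
      = (ss.map (fun s => (ts.map (fun t => f s t)).sum)).sum := by
  induction ts with
  | nil => simp
  | cons t ts ih =>
    simp only [List.map_cons, List.sum_cons, ih, PySem.List.sum_map_add_int]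

-- every key of a kept severity's row is one of the task types
theorem pvKeysSub (d : PySem.Dict String (List (String × Int))) (s : String)
    (hs : d.contains s = true) :
    ∀ k ∈ (PySem.Dict.ofList (d.getD s [])).keys, k ∈ pvTaskTypes d := by
  intro k hk
  unfold pvTaskTypes
  rw [PySem.List.mem_sorted, PySem.Set.mem_ofList, List.mem_flatMap]
  refine ⟨d.getD s [], ?_, hk⟩
  have hsome : (d.get? s).isSome := by
    have h := PySem.Dict.contains_eq_isSome_get? (d := d) (k := s)
    rw [hs] at h; exact h.symm
  obtain ⟨v, hv⟩ := Option.isSome_iff_exists.mp hsome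
  have hgd : d.getD s [] = v := PySem.Dict.getD_of_get?_eq_some _ _ hv
  rw [hgd]
  exact List.mem_map.mpr ⟨(s, v), PySem.Dict.mem_items_of_get?_eq_some _ hv, rfl⟩

theorem pvTaskTypesNodup (d : PySem.Dict String (List (String × Int))) :
    (pvTaskTypes d).Nodup :=
  (PySem.List.sorted_perm ..).symm.nodup (PySem.Set.nodup_ofList _)

-- A's row loop (line appending + running grand total) as a map and a separate sum
theorem pvFoldPair {α β : Type} (ts : List α) (F : α → List β) (R : α → Int) :
    ∀ (acc : List (List β)) (g : Int),
      ts.foldl (fun st t => (st.1 ++ [F t], st.2 + R t)) (acc, g)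
        = (acc ++ ts.map F, g + (ts.map R).sum) := by
  induction ts with
  | nil => intro acc g; simp
  | cons t ts ih =>
    intro acc g
    simp only [List.foldl_cons, List.map_cons, List.sum_cons, ih]
    simp [List.append_assoc, add_assoc]

-- B's column-major rendering loop, characterised per line
theorem pvRenderChar (d : PySem.Dict String (List (String × Int))) (l : List (String × Int)) :
    ∀ (g : String → List Char) (h0 f0 : List Char),
      l.foldl (fun (st : List Char × List (List Char) × List Char) sc =>
          (st.1 ++ pvRightPad (pvSevShort.getD sc.1 sc.1).toList 7,
           List.zipWith (fun line t => line ++ pvCellStr (pvCellVal d sc.1 t)) st.2.1 (pvTaskTypes d),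
           st.2.2 ++ pvRightPad (pvIntStr sc.2) 7)) (h0, (pvTaskTypes d).map g, f0)
        = (h0 ++ (l.map (fun sc => pvRightPad (pvSevShort.getD sc.1 sc.1).toList 7)).flatten,
           (pvTaskTypes d).map (fun t => g t ++ (l.map (fun sc => pvCellStr (pvCellVal d sc.1 t))).flatten),
           f0 ++ (l.map (fun sc => pvRightPad (pvIntStr sc.2) 7)).flatten) := by
  induction l with
  | nil => intro g h0 f0; simp
  | cons sc l ih =>
    intro g h0 f0
    simp only [List.foldl_cons, List.zipWith_map_left, List.zipWith_self, List.map_cons,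
      List.flatten_cons]
    rw [show ((pvTaskTypes d).map fun t => g t ++ pvCellStr (pvCellVal d sc.1 t))
        = (pvTaskTypes d).map (fun t => g t ++ pvCellStr (pvCellVal d sc.1 t)) from rfl, ih]
    simp [List.append_assoc]

-- zipping a list with a map of itself
theorem pvZipMapSelf {α β : Type} (l : List α) (f : α → β) :
    l.zip (l.map f) = l.map (fun x => (x, f x)) := by
  induction l with
  | nil => rfl
  | cons x l ih => simp [ih]

-- ===== VERDICT (by name: the statement is the Claim_ definition above) =====
theorem format_task_type_table_spec : Claim_equal_format_task_type_table := by
  intro pivot _ _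
  show format_task_type_table pivot = format_task_type_table_alt pivot
  unfold format_task_type_table format_task_type_table_alt
  simp only [pvTotalsChar, List.nil_append, zero_add]
  simp only [pvZipMapSelf, pvRenderChar, pvFoldPair, pvHeader, PySem.List.foldl_add,
    List.zipWith_map_left, List.zipWith_self, List.map_map, Function.comp_def, zero_add,
    pvRowTot, PySem.Dict.getD_empty, List.append_assoc, List.cons_append, List.nil_append]
  -- the only residual differences: the footer column sums and the grand total
  have hcol : ∀ s ∈ pvSevOrder.filter (fun s => (PySem.Dict.ofList pivot).contains s),
      (List.map (pvCellVal (PySem.Dict.ofList pivot) s) (pvTaskTypes (PySem.Dict.ofList pivot))).sum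
        = (List.map (fun x => x.2)
            (PySem.Dict.ofList ((PySem.Dict.ofList pivot).getD s [])).items).sum := by
    intro s hs
    exact pvColSum _ (pvTaskTypesNodup _) _ (PySem.Dict.nodup_keys_ofList _)
      (pvKeysSub _ s (List.mem_filter.mp hs).2)
  have hfoot :
      List.map (fun s => pvRightPad (pvIntStr
          (List.map (pvCellVal (PySem.Dict.ofList pivot) s) (pvTaskTypes (PySem.Dict.ofList pivot))).sum) 7)
        (List.filter (fun s => (PySem.Dict.ofList pivot).contains s) pvSevOrder)
      = List.map (fun x => pvRightPad (pvIntStr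
          (List.map (fun x => x.2)
            (PySem.Dict.ofList ((PySem.Dict.ofList pivot).getD x [])).items).sum) 7)
        (List.filter (fun s => (PySem.Dict.ofList pivot).contains s) pvSevOrder) :=
    List.map_congr_left (fun s hs => by rw [hcol s hs])
  have hgrand :
      (List.map (fun t => (List.map (fun x => pvCellVal (PySem.Dict.ofList pivot) x t)
          (List.filter (fun s => (PySem.Dict.ofList pivot).contains s) pvSevOrder)).sum)
        (pvTaskTypes (PySem.Dict.ofList pivot))).sum
      = (List.map (fun s => (List.map (fun x => x.2)
            (PySem.Dict.ofList ((PySem.Dict.ofList pivot).getD s [])).items).sum)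
          (List.filter (fun s => (PySem.Dict.ofList pivot).contains s) pvSevOrder)).sum := by
    rw [pvSumComm]
    exact congrArg List.sum (List.map_congr_left (fun s hs => hcol s hs))
  rw [hfoot, hgrand]
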